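-- pv_equiv track=rewrite | github.com/bekiroruk/Python | okek.py | okek_bulma
-- ===== SOURCE A (Python) =====
-- def okek_bulma(sayi1,sayi2):
--
--     i = 1
--     okek = 1
--
--     while (i <= sayi1 and i <= sayi2):
--
--         if( not (sayi1 % i) or not (sayi2 % i)):
--             okek += i
--
--         i+=1
--     return okek
-- ===== SOURCE B (Python) =====
-- def _divsum_le(n, m, excl):
--     # Sum of the divisors e of n with e <= m, skipping (when excl is given)
--     # those that also divide excl.  Trial division up to sqrt(n).
--     total = 0
--     d = 1
--     while d * d <= n:
--         if n % d == 0: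
--             if d <= m and (excl is None or excl % d != 0):
--                 total += d
--             e = n // d
--             if e != d and e <= m and (excl is None or excl % e != 0):
--                 total += e
--         d += 1
--     return total
--
--
-- def okek_bulma(sayi1, sayi2):
--     m = sayi1 if sayi1 < sayi2 else sayi2
--     if m < 1:
--         return 1
--     return 1 + _divsum_le(sayi1, m, None) + _divsum_le(sayi2, m, sayi1)
-- ===== Notes on version B (the rewrite author's own statement) =====
-- stated objective: faster
-- what changed: Instead of scanning every i from 1 to min(sayi1,sayi2) and testing divisibility, B enumerates the divisors of each number by trial division up to sqrt(n), filters them by <= min, and avoids double counting by skipping divisors of sayi1 in sayi2's pass; the +1 initial accumulator is kept.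
import Mathlib
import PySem

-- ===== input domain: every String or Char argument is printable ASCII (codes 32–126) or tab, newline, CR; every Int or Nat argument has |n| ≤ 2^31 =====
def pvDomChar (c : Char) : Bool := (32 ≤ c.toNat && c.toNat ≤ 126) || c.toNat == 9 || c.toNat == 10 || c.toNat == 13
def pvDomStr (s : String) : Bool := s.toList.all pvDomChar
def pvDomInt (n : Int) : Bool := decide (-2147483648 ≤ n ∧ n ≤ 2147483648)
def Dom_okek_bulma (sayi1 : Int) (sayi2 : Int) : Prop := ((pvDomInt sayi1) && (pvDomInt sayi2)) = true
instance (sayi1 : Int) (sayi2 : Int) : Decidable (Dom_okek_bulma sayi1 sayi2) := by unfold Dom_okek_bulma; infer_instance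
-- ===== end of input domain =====

-- B replaces A's linear scan of 1..min(sayi1,sayi2) by trial-division divisor enumeration of
-- each argument up to its square root, filtering divisors by ≤ min and skipping divisors of
-- sayi1 in sayi2's pass to avoid double counting (objective: faster).

-- ===== PORT A =====
-- while (i <= sayi1 and i <= sayi2): if not (sayi1 % i) or not (sayi2 % i): okek += i ; i += 1
def okekLoop (sayi1 sayi2 i okek : Int) : Int :=
  if _h : i ≤ sayi1 ∧ i ≤ sayi2 then
    okekLoop sayi1 sayi2 (i + 1)
      (if PySem.Int.mod sayi1 i = 0 ∨ PySem.Int.mod sayi2 i = 0 then okek + i else okek)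
  else okek
termination_by (min sayi1 sayi2 + 1 - i).toNat
decreasing_by omega

def okek_bulma (sayi1 : Int) (sayi2 : Int) : Int := okekLoop sayi1 sayi2 1 1

-- ===== PORT B =====
-- 'excl is None or excl % e != 0'
def pvKeep (excl : Option Int) (e : Int) : Bool :=
  match excl with
  | none => true
  | some x => PySem.Int.mod x e != 0

-- the while-loop of _divsum_le in Source B
def divsumLoop (n m : Int) (excl : Option Int) (d total : Int) : Int :=
  if _h : d * d ≤ n then
    divsumLoop n m excl (d + 1)
      (let total := if PySem.Int.mod n d = 0 then
          let total := if d ≤ m ∧ pvKeep excl d = true then total + d else total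
          let e := PySem.Int.floordiv n d
          if e ≠ d ∧ e ≤ m ∧ pvKeep excl e = true then total + e else total
        else total
       total)
  else total
termination_by (n + 1 - d).toNat
decreasing_by
  have hd : d ≤ n := by nlinarith [mul_self_nonneg d]
  omega

def okek_bulma_alt (sayi1 : Int) (sayi2 : Int) : Int :=
  let m := if sayi1 < sayi2 then sayi1 else sayi2
  if m < 1 then 1
  else 1 + divsumLoop sayi1 m none 1 0 + divsumLoop sayi2 m (some sayi1) 1 0

-- ===== PRECONDITION & SPEC =====
def Spec_okek_bulma (sayi1 : Int) (sayi2 : Int) (out : Int) : Prop := out = okek_bulma_alt sayi1 sayi2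
instance (sayi1 : Int) (sayi2 : Int) (out : Int) : Decidable (Spec_okek_bulma sayi1 sayi2 out) := by unfold Spec_okek_bulma; infer_instance

-- ===== CLAIM (what is proved, stated in full; the proofs are below) =====
def Claim_equal_okek_bulma : Prop := ∀ (sayi1 : Int) (sayi2 : Int), Dom_okek_bulma sayi1 sayi2 → Spec_okek_bulma sayi1 sayi2 (okek_bulma sayi1 sayi2)

-- ===== LEMMAS AND PROOFS =====

-- A's loop sums every j in [i, min a b] dividing a or b.
lemma okekLoop_eq (a b i s : Int) :
    okekLoop a b i s = s + ∑ j ∈ Finset.Icc i (min a b), (if j ∣ a ∨ j ∣ b then j else 0) := by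
  by_cases h : i ≤ a ∧ i ≤ b
  · rw [okekLoop, dif_pos h, okekLoop_eq a b (i + 1)]
    have hins : Finset.Icc i (min a b) = insert i (Finset.Icc (i + 1) (min a b)) := by
      ext j; simp only [Finset.mem_Icc, Finset.mem_insert]; omega
    have hmem : i ∉ Finset.Icc (i + 1) (min a b) := by
      simp only [Finset.mem_Icc]; omega
    rw [hins, Finset.sum_insert hmem]
    have hc : (PySem.Int.mod a i = 0 ∨ PySem.Int.mod b i = 0) ↔ (i ∣ a ∨ i ∣ b) := by
      rw [PySem.Int.mod_eq_zero_iff_dvd, PySem.Int.mod_eq_zero_iff_dvd]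
    by_cases hd : i ∣ a ∨ i ∣ b
    · rw [if_pos (hc.mpr hd), if_pos hd]; ring
    · rw [if_neg (fun hx => hd (hc.mp hx)), if_neg hd]; ring
  · rw [okekLoop, dif_neg h]
    have he : Finset.Icc i (min a b) = ∅ := Finset.Icc_eq_empty (by omega)
    rw [he, Finset.sum_empty, add_zero]
termination_by (min a b + 1 - i).toNat
decreasing_by omega

-- the divisors of n that the trial-division loop still collects from stage d on
abbrev pvCond (n m : Int) (excl : Option Int) (d j : Int) : Prop :=
  j ∣ n ∧ j ≤ m ∧ pvKeep excl j = true ∧ d ≤ j ∧ d * j ≤ n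

-- one trial-division step, pointwise over j
lemma pvCond_step (n m : Int) (excl : Option Int) (d j : Int)
    (hd : 1 ≤ d) (hdd : d * d ≤ n) (hj1 : 1 ≤ j) :
    (if pvCond n m excl d j then j else 0) =
      ((if j = d then (if d ∣ n ∧ d ≤ m ∧ pvKeep excl d = true then d else 0) else 0) +
       (if j = n / d then (if d ∣ n ∧ n / d ≠ d ∧ n / d ≤ m ∧ pvKeep excl (n / d) = true then n / d else 0) else 0)) +
      (if pvCond n m excl (d + 1) j then j else 0) := by
  have hdpos : (0:Int) < d := by omega
  have hjpos : (0:Int) < j := by omega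
  have hF5 : d ∣ n → ¬ pvCond n m excl (d + 1) (n / d) := by
    rintro hdn ⟨-, -, -, h4, h5⟩
    have he : n / d * d = n := Int.ediv_mul_cancel hdn
    nlinarith
  by_cases hB : pvCond n m excl (d + 1) j
  · -- still pending at d+1
    have hA : pvCond n m excl d j := by
      obtain ⟨h1, h2, h3, h4, h5⟩ := hB
      exact ⟨h1, h2, h3, by omega, by nlinarith⟩
    have hjd : j ≠ d := by have := hB.2.2.2.1; omega
    have hje : ∀ hx : j = n / d, ¬ (d ∣ n ∧ n / d ≠ d ∧ n / d ≤ m ∧ pvKeep excl (n / d) = true) := by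
      rintro hx ⟨hdn, -, -, -⟩
      exact hF5 hdn (hx ▸ hB)
    rw [if_pos hA, if_pos hB, if_neg hjd]
    by_cases hx : j = n / d
    · rw [if_pos hx, if_neg (hje hx)]; ring
    · rw [if_neg hx]; ring
  · by_cases hA : pvCond n m excl d j
    · obtain ⟨h1, h2, h3, h4, h5⟩ := hA
      by_cases hjd : j = d
      · -- collected now as the small divisor
        subst hjd
        rw [if_pos ⟨h1, h2, h3, h4, h5⟩, if_neg hB, if_pos rfl, if_pos ⟨h1, h2, h3⟩]
        by_cases hx : j = n / j
        · rw [if_pos hx, if_neg (by rw [← hx]; rintro ⟨-, hne, -⟩; exact hne rfl)]; ring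
        · rw [if_neg hx]; ring
      · -- collected now as the co-divisor: j = n / d with d ∣ n
        obtain ⟨k, hk⟩ := h1
        have hd1 : d + 1 ≤ j := by omega
        have hbig : n < (d + 1) * j := by
          by_contra hx; exact hB ⟨⟨k, hk⟩, h2, h3, hd1, by omega⟩
        have hkd : k = d := by
          have hk1 : d ≤ k := by nlinarith
          have hk2 : k < d + 1 := by nlinarith
          omega
        have hk' : n = j * d := by rw [hk, hkd]
        have hdn : d ∣ n := ⟨j, by rw [hk']; ring⟩
        have hed : n / d = j := by rw [hk']; exact Int.mul_ediv_cancel j hdpos.ne'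
        rw [if_pos ⟨⟨k, hk⟩, h2, h3, h4, h5⟩, if_neg hB, if_neg hjd, if_pos hed.symm, hed,
          if_pos ⟨hdn, hjd, h2, h3⟩]
        ring
    · -- never collected from stage d on
      rw [if_neg hA, if_neg hB]
      have t1 : (if j = d then (if d ∣ n ∧ d ≤ m ∧ pvKeep excl d = true then d else 0) else 0) = 0 := by
        by_cases hjd : j = d
        · rw [if_pos hjd, if_neg]
          rintro ⟨hdn, hm, hkp⟩
          exact hA ⟨hjd ▸ hdn, hjd ▸ hm, hjd ▸ hkp, by omega, hjd ▸ hdd⟩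
        · rw [if_neg hjd]
      have t2 : (if j = n / d then (if d ∣ n ∧ n / d ≠ d ∧ n / d ≤ m ∧ pvKeep excl (n / d) = true then n / d else 0) else 0) = 0 := by
        by_cases hje : j = n / d
        · rw [if_pos hje, if_neg]
          rintro ⟨hdn, -, hm, hkp⟩
          have he : n / d * d = n := Int.ediv_mul_cancel hdn
          apply hA
          refine ⟨⟨d, by rw [← hje] at he; rw [← he]⟩, hje ▸ hm, hje ▸ hkp, ?_, ?_⟩
          · -- d ≤ j = n/d from d*d ≤ n = (n/d)*d
            rw [hje]; nlinarith
          · rw [hje]; nlinarith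
        · rw [if_neg hje]
      rw [t1, t2]; ring

-- the trial-division loop sums the still-pending divisors
lemma divsumLoop_eq (n m : Int) (excl : Option Int) (d s : Int) (hn : 1 ≤ n) (hd : 1 ≤ d) :
    divsumLoop n m excl d s = s + ∑ j ∈ Finset.Icc 1 n, (if pvCond n m excl d j then j else 0) := by
  by_cases h : d * d ≤ n
  · have hdn_le : d ≤ n := by nlinarith
    have hsplit : ∑ j ∈ Finset.Icc 1 n, (if pvCond n m excl d j then j else 0)
        = ((if d ∣ n ∧ d ≤ m ∧ pvKeep excl d = true then d else 0)
           + (if d ∣ n ∧ n / d ≠ d ∧ n / d ≤ m ∧ pvKeep excl (n / d) = true then n / d else 0))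
          + ∑ j ∈ Finset.Icc 1 n, (if pvCond n m excl (d + 1) j then j else 0) := by
      rw [Finset.sum_congr rfl (fun j hj =>
        pvCond_step n m excl d j hd h (Finset.mem_Icc.mp hj).1)]
      rw [Finset.sum_add_distrib, Finset.sum_add_distrib]
      congr 1
      have hdm : d ∈ Finset.Icc (1:Int) n := Finset.mem_Icc.mpr ⟨hd, hdn_le⟩
      have hem : n / d ∈ Finset.Icc (1:Int) n := by
        refine Finset.mem_Icc.mpr ⟨?_, Int.ediv_le_self d (by omega)⟩
        rw [Int.le_ediv_iff_mul_le (by omega : (0:Int) < d)]; omega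
      rw [Finset.sum_ite_eq' (Finset.Icc 1 n) d
            (fun _ => if d ∣ n ∧ d ≤ m ∧ pvKeep excl d = true then d else 0),
          Finset.sum_ite_eq' (Finset.Icc 1 n) (n / d)
            (fun _ => if d ∣ n ∧ n / d ≠ d ∧ n / d ≤ m ∧ pvKeep excl (n / d) = true then n / d else 0),
          if_pos hdm, if_pos hem]
    rw [divsumLoop, dif_pos h, divsumLoop_eq n m excl (d + 1) _ hn (by omega), hsplit]
    have hfd : PySem.Int.floordiv n d = n / d := PySem.Int.floordiv_eq_ediv_of_pos (by omega)
    simp only [hfd, PySem.Int.mod_eq_zero_iff_dvd]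
    split_ifs <;> try ring
    all_goals tauto
  · rw [divsumLoop, dif_neg h]
    have hz : ∀ j ∈ Finset.Icc (1:Int) n, (if pvCond n m excl d j then j else 0) = 0 := by
      intro j hj
      rw [if_neg]
      rintro ⟨-, -, -, h4, h5⟩
      have : d * d ≤ d * j := by nlinarith
      omega
    rw [Finset.sum_congr rfl hz, Finset.sum_const_zero, add_zero]
termination_by (n + 1 - d).toNat
decreasing_by
  have : d ≤ n := by nlinarith [mul_self_nonneg d]
  omega

-- ===== VERDICT (by name: the statement is the Claim_ definition above) =====
theorem okek_bulma_spec : Claim_equal_okek_bulma := by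
  unfold Claim_equal_okek_bulma
  intro a b _
  unfold Spec_okek_bulma okek_bulma okek_bulma_alt
  have hmin : (if a < b then a else b) = min a b := by rw [min_def]; split_ifs <;> omega
  simp only [hmin]
  by_cases hm : min a b < 1
  · rw [if_pos hm, okekLoop, dif_neg (by omega)]
  · have hm' : 1 ≤ min a b := by omega
    clear hm
    have ha : 1 ≤ a := le_trans hm' (min_le_left a b)
    have hb : 1 ≤ b := le_trans hm' (min_le_right a b)
    rw [if_neg (by omega), okekLoop_eq,
      divsumLoop_eq a (min a b) none 1 0 ha le_rfl,
      divsumLoop_eq b (min a b) (some a) 1 0 hb le_rfl]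
    have h1 : ∑ j ∈ Finset.Icc (1:Int) a, (if pvCond a (min a b) none 1 j then j else 0)
        = ∑ j ∈ Finset.Icc (1:Int) (min a b), (if j ∣ a then j else 0) := by
      rw [← Finset.sum_subset (Finset.Icc_subset_Icc_right (min_le_left a b))
        (fun j hj hnj => by
          rw [if_neg]
          rintro ⟨-, h2, -⟩
          exact hnj (Finset.mem_Icc.mpr ⟨(Finset.mem_Icc.mp hj).1, h2⟩))]
      refine Finset.sum_congr rfl (fun j hj => ?_)
      obtain ⟨hj1, hj2⟩ := Finset.mem_Icc.mp hj
      by_cases hdj : j ∣ a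
      · rw [if_pos ⟨hdj, hj2, rfl, hj1, by omega⟩, if_pos hdj]
      · rw [if_neg (fun hx => hdj hx.1), if_neg hdj]
    have hkeep : ∀ j : Int, pvKeep (some a) j = true ↔ ¬ j ∣ a := by
      intro j
      simp [pvKeep, PySem.Int.mod_eq_zero_iff_dvd]
    have h2 : ∑ j ∈ Finset.Icc (1:Int) b, (if pvCond b (min a b) (some a) 1 j then j else 0)
        = ∑ j ∈ Finset.Icc (1:Int) (min a b), (if j ∣ b ∧ ¬ j ∣ a then j else 0) := by
      rw [← Finset.sum_subset (Finset.Icc_subset_Icc_right (min_le_right a b))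
        (fun j hj hnj => by
          rw [if_neg]
          rintro ⟨-, h2, -⟩
          exact hnj (Finset.mem_Icc.mpr ⟨(Finset.mem_Icc.mp hj).1, h2⟩))]
      refine Finset.sum_congr rfl (fun j hj => ?_)
      obtain ⟨hj1, hj2⟩ := Finset.mem_Icc.mp hj
      by_cases hdj : j ∣ b ∧ ¬ j ∣ a
      · rw [if_pos ⟨hdj.1, hj2, (hkeep j).mpr hdj.2, hj1, by omega⟩, if_pos hdj]
      · rw [if_neg, if_neg hdj]
        rintro ⟨x1, -, x3, -⟩
        exact hdj ⟨x1, (hkeep j).mp x3⟩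
    have h3 : ∑ j ∈ Finset.Icc (1:Int) (min a b), (if j ∣ a ∨ j ∣ b then j else 0)
        = ∑ j ∈ Finset.Icc (1:Int) (min a b), (if j ∣ a then j else 0)
          + ∑ j ∈ Finset.Icc (1:Int) (min a b), (if j ∣ b ∧ ¬ j ∣ a then j else 0) := by
      rw [← Finset.sum_add_distrib]
      refine Finset.sum_congr rfl (fun j hj => ?_)
      by_cases hda : j ∣ a
      · rw [if_pos (Or.inl hda), if_pos hda, if_neg (fun hx => hx.2 hda), add_zero]
      · by_cases hdb : j ∣ b
        · rw [if_pos (Or.inr hdb), if_neg hda, if_pos ⟨hdb, hda⟩, zero_add]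
        · rw [if_neg (fun hx => hx.elim hda hdb), if_neg hda, if_neg (fun hx => hdb hx.1), add_zero]
    rw [h1, h2, h3]
    ring
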